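-- pv_equiv track=rewrite | github.com/6oncvlo/python-lists-loops-programming-exercises | exercises/16-Techno_beat/app.py | lyrics_generator
-- ===== SOURCE A (Python) =====
-- def lyrics_generator(l):
--     m=""
--     for k in range(len(l)):
--         if l[k]==0:
--             m=m+" Boom "
--         elif k>1 and l[k]==1 and l[k-1]==1 and l[k-2]==1:
--             m=m+" Drop the base !!!Break the base!!! "
--         else:
--             m=m+" Drop the base "
--     return m
-- ===== SOURCE B (Python) =====
-- def lyrics_generator(l):
--     parts = []
--     run = 0  # length of the current streak of consecutive 1s
--     for x in l:
--         if x == 0: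
--             run = 0
--             parts.append(" Boom ")
--         elif x == 1:
--             run += 1
--             parts.append(" Drop the base !!!Break the base!!! " if run >= 3
--                          else " Drop the base ")
--         else:
--             run = 0
--             parts.append(" Drop the base ")
--     return "".join(parts)
-- ===== Notes on version B (the rewrite author's own statement) =====
-- stated objective: alternative
-- what changed: Replaces range/index iteration with backward lookback l[k-1]/l[k-2] by a single pass over the elements maintaining a consecutive-1s run counter, collecting pieces into a list joined at the end.
import Mathlib
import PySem

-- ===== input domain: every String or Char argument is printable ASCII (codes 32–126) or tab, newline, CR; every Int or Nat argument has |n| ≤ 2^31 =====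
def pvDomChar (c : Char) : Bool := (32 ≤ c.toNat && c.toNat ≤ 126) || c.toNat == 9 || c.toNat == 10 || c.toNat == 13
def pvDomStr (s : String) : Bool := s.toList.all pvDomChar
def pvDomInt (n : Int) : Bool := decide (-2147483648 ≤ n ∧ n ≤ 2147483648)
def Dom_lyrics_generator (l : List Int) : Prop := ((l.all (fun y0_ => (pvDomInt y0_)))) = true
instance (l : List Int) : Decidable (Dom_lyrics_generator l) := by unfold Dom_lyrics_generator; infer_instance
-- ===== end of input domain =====

-- B replaces A's range/index loop with backward lookback by a one-pass run counter over the
-- elements, joining the collected pieces; equal return value proved on all inputs.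

-- ===== PORT A =====
-- literal transliteration: for k in range(len(l)) with lookback l[k-1], l[k-2]
-- (all indices Python actually evaluates are in range, so pyGetD is exact here)
def lyrics_generator (l : List Int) : String :=
  (PySem.List.pyRange 0 (l.length : Int) 1).foldl (fun m k =>
    if PySem.List.pyGetD l k 0 = 0 then m ++ " Boom "
    else if 1 < k ∧ PySem.List.pyGetD l k 0 = 1 ∧ PySem.List.pyGetD l (k-1) 0 = 1
            ∧ PySem.List.pyGetD l (k-2) 0 = 1 then
      m ++ " Drop the base !!!Break the base!!! "
    else m ++ " Drop the base ") ""

-- ===== PORT B =====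
-- literal transliteration of Source B: one pass over elements with a run counter, pieces joined
def lyrics_generator_alt (l : List Int) : String :=
  String.join (l.foldl (fun (st : Int × List String) x =>
    if x = 0 then (0, st.2 ++ [" Boom "])
    else if x = 1 then
      ((st.1 + 1),
       st.2 ++ [if st.1 + 1 ≥ 3 then " Drop the base !!!Break the base!!! " else " Drop the base "])
    else (0, st.2 ++ [" Drop the base "])) ((0 : Int), ([] : List String))).2

-- ===== PRECONDITION & SPEC =====
def Spec_lyrics_generator (l : List Int) (out : String) : Prop := out = lyrics_generator_alt l
instance (l : List Int) (out : String) : Decidable (Spec_lyrics_generator l out) := by unfold Spec_lyrics_generator; infer_instance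

-- ===== CLAIM (what is proved, stated in full; the proofs are below) =====
def Claim_equal_lyrics_generator : Prop := ∀ (l : List Int), Dom_lyrics_generator l → Spec_lyrics_generator l (lyrics_generator l)

-- ===== LEMMAS AND PROOFS =====

-- B's fold step, named for the proofs
def bStep (st : Int × List String) (x : Int) : Int × List String :=
  if x = 0 then (0, st.2 ++ [" Boom "])
  else if x = 1 then
    ((st.1 + 1),
     st.2 ++ [if st.1 + 1 ≥ 3 then " Drop the base !!!Break the base!!! " else " Drop the base "])
  else (0, st.2 ++ [" Drop the base "])

theorem alt_eq (l : List Int) :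
    lyrics_generator_alt l = String.join (l.foldl bStep (0, [])).2 := rfl

-- the run counter after processing l, as a standalone fold
def trail (l : List Int) : Int :=
  l.foldl (fun c x => if x = 1 then c + 1 else 0) 0

theorem bstep_fst (st : Int × List String) (x : Int) :
    (bStep st x).1 = if x = 1 then st.1 + 1 else 0 := by
  unfold bStep
  by_cases h0 : x = 0 <;> by_cases h1 : x = 1 <;> simp_all

theorem bfold_fst (l : List Int) : ∀ st : Int × List String,
    (l.foldl bStep st).1 = l.foldl (fun c x => if x = 1 then c + 1 else 0) st.1 := by
  induction l with
  | nil => intro st; rfl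
  | cons x xs ih =>
    intro st
    simp only [List.foldl_cons, ih, bstep_fst]

theorem trail_aux_nonneg (l : List Int) : ∀ c : Int, 0 ≤ c →
    0 ≤ l.foldl (fun c x => if x = 1 then c + 1 else 0) c := by
  induction l with
  | nil => intro c hc; exact hc
  | cons x xs ih =>
    intro c hc
    simp only [List.foldl_cons]
    apply ih
    split <;> omega

theorem trail_nonneg (l : List Int) : 0 ≤ trail l := trail_aux_nonneg l 0 le_rfl

theorem trail_snoc (l : List Int) (x : Int) :
    trail (l ++ [x]) = if x = 1 then trail l + 1 else 0 := by
  unfold trail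
  rw [List.foldl_append]
  rfl

theorem getD_snoc_last (xs : List Int) (x : Int) :
    (xs ++ [x]).getD ((xs ++ [x]).length - 1) 0 = x := by
  have hlen : (xs ++ [x]).length = xs.length + 1 := by simp
  rw [hlen]
  simp [List.getD]

-- trail ≥ 1 ↔ last element is 1
theorem trail_ge_one (l : List Int) :
    1 ≤ trail l ↔ (1 ≤ l.length ∧ l.getD (l.length - 1) 0 = 1) := by
  induction l using List.reverseRecOn with
  | nil => simp [trail]
  | append_singleton xs x ih =>
    rw [trail_snoc, getD_snoc_last]
    have hlen : (xs ++ [x]).length = xs.length + 1 := by simp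
    rw [hlen]
    have hnn := trail_nonneg xs
    split <;> rename_i h
    · exact ⟨fun _ => ⟨by omega, h⟩, fun _ => by omega⟩
    · constructor
      · intro h1; exact absurd h1 (by omega)
      · rintro ⟨-, h1⟩; exact absurd h1 h

-- trail ≥ 2 ↔ last two elements are 1
theorem trail_ge_two (l : List Int) :
    2 ≤ trail l ↔ (2 ≤ l.length ∧ l.getD (l.length - 1) 0 = 1 ∧ l.getD (l.length - 2) 0 = 1) := by
  induction l using List.reverseRecOn with
  | nil => simp [trail]
  | append_singleton xs x _ =>
    rw [trail_snoc, getD_snoc_last]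
    have hlen : (xs ++ [x]).length = xs.length + 1 := by simp
    rw [hlen]
    have hnn := trail_nonneg xs
    split <;> rename_i h
    · rcases Nat.eq_zero_or_pos xs.length with h0 | hpos
      · have hnil : xs = [] := List.length_eq_zero_iff.mp h0
        subst hnil
        constructor
        · intro h2; simp [trail] at h2
        · rintro ⟨h2, -, -⟩; omega
      · have hget2 : (xs ++ [x]).getD (xs.length + 1 - 2) 0 = xs.getD (xs.length - 1) 0 := by
          have heq : xs.length + 1 - 2 = xs.length - 1 := by omega
          have hlt : xs.length - 1 < xs.length := by omega
          rw [heq, List.getD_eq_getElem _ _ (by simp only [List.length_append, List.length_cons, List.length_nil]; omega), List.getD_eq_getElem _ _ (by omega)]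
          exact List.getElem_append_left hlt
        rw [hget2]
        have key := trail_ge_one xs
        constructor
        · intro h2; exact ⟨by omega, h, (key.mp (by omega)).2⟩
        · rintro ⟨-, -, hg⟩
          have := key.mpr ⟨by omega, hg⟩
          omega
    · constructor
      · omega
      · rintro ⟨-, h1, -⟩; exact absurd h1 h

theorem pyGetD_snoc_lt (xs : List Int) (x : Int) (k : Int) (h0 : 0 ≤ k) (h1 : k < (xs.length : Int)) :
    PySem.List.pyGetD (xs ++ [x]) k 0 = PySem.List.pyGetD xs k 0 := by
  have hk : k.toNat < xs.length := by omega
  rw [PySem.List.pyGetD_eq_getElem (xs ++ [x]) 0 h0 (by simp; omega),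
      PySem.List.pyGetD_eq_getElem xs 0 h0 (by exact_mod_cast h1)]
  exact List.getElem_append_left hk

theorem ite_append (m s1 s2 : String) (c : Prop) [Decidable c] :
    (if c then m ++ s1 else m ++ s2) = m ++ (if c then s1 else s2) := by
  split_ifs <;> rfl

-- A on a snoc list: process xs, then one step reading x and the last two of xs
theorem A_snoc (xs : List Int) (x : Int) :
    lyrics_generator (xs ++ [x]) = lyrics_generator xs ++
      (if x = 0 then " Boom "
       else if 2 ≤ xs.length ∧ x = 1 ∧ xs.getD (xs.length - 1) 0 = 1
               ∧ xs.getD (xs.length - 2) 0 = 1 then " Drop the base !!!Break the base!!! "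
       else " Drop the base ") := by
  unfold lyrics_generator
  have hlen : (((xs ++ [x]).length : Nat) : Int) = (xs.length : Int) + 1 := by simp
  rw [hlen, PySem.List.pyRange_one_succ_right (by positivity), List.foldl_append]
  simp only [List.foldl_cons, List.foldl_nil]
  have hcong : (PySem.List.pyRange 0 (xs.length : Int) 1).foldl (fun m k =>
      if PySem.List.pyGetD (xs ++ [x]) k 0 = 0 then m ++ " Boom "
      else if 1 < k ∧ PySem.List.pyGetD (xs ++ [x]) k 0 = 1 ∧ PySem.List.pyGetD (xs ++ [x]) (k-1) 0 = 1
              ∧ PySem.List.pyGetD (xs ++ [x]) (k-2) 0 = 1 then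
        m ++ " Drop the base !!!Break the base!!! "
      else m ++ " Drop the base ") "" =
      (PySem.List.pyRange 0 (xs.length : Int) 1).foldl (fun m k =>
      if PySem.List.pyGetD xs k 0 = 0 then m ++ " Boom "
      else if 1 < k ∧ PySem.List.pyGetD xs k 0 = 1 ∧ PySem.List.pyGetD xs (k-1) 0 = 1
              ∧ PySem.List.pyGetD xs (k-2) 0 = 1 then
        m ++ " Drop the base !!!Break the base!!! "
      else m ++ " Drop the base ") "" := by
    apply PySem.List.foldl_congr_mem
    intro acc k hk
    rw [PySem.List.mem_pyRange_one] at hk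
    obtain ⟨hk0, hk1⟩ := hk
    rw [pyGetD_snoc_lt xs x k hk0 hk1]
    by_cases hgt : 1 < k
    · rw [pyGetD_snoc_lt xs x (k-1) (by omega) (by omega),
          pyGetD_snoc_lt xs x (k-2) (by omega) (by omega)]
    · apply if_congr Iff.rfl rfl
      apply if_congr _ rfl rfl
      exact ⟨fun ⟨h, _⟩ => absurd h hgt, fun ⟨h, _⟩ => absurd h hgt⟩
  rw [hcong]
  have hgetn : PySem.List.pyGetD (xs ++ [x]) (xs.length : Int) 0 = x := by
    rw [PySem.List.pyGetD_eq_getElem (xs ++ [x]) 0 (by positivity) (by simp)]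
    simp
  rw [hgetn, ite_append _ _ _, ite_append _ _ _]
  congr 1
  by_cases hx0 : x = 0
  · simp [hx0]
  · rw [if_neg hx0, if_neg hx0]
    apply if_congr _ rfl rfl
    have h1 : 2 ≤ xs.length → PySem.List.pyGetD (xs ++ [x]) ((xs.length : Int) - 1) 0 = xs.getD (xs.length - 1) 0 := by
      intro hge
      rw [pyGetD_snoc_lt xs x _ (by omega) (by omega),
          PySem.List.pyGetD_eq_getElem xs 0 (by omega) (by omega)]
      rw [← List.getD_eq_getElem xs 0 (show ((xs.length : Int) - 1).toNat < xs.length by omega)]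
      congr 1
      omega
    have h2 : 2 ≤ xs.length → PySem.List.pyGetD (xs ++ [x]) ((xs.length : Int) - 2) 0 = xs.getD (xs.length - 2) 0 := by
      intro hge
      rw [pyGetD_snoc_lt xs x _ (by omega) (by omega),
          PySem.List.pyGetD_eq_getElem xs 0 (by omega) (by omega)]
      rw [← List.getD_eq_getElem xs 0 (show ((xs.length : Int) - 2).toNat < xs.length by omega)]
      congr 1
      omega
    constructor
    · rintro ⟨ha, hb, hc, hd⟩
      have hge : 2 ≤ xs.length := by omega
      rw [h1 hge] at hc
      rw [h2 hge] at hd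
      exact ⟨hge, hb, hc, hd⟩
    · rintro ⟨hge, hb, hc, hd⟩
      refine ⟨by omega, hb, ?_, ?_⟩
      · rw [h1 hge]; exact hc
      · rw [h2 hge]; exact hd

theorem join_snoc (l : List String) (s : String) :
    String.join (l ++ [s]) = String.join l ++ s := by
  simp [String.join, List.foldl_append]

-- B on a snoc list
theorem B_snoc (xs : List Int) (x : Int) :
    lyrics_generator_alt (xs ++ [x]) = lyrics_generator_alt xs ++
      (if x = 0 then " Boom "
       else if x = 1 then
         (if trail xs + 1 ≥ 3 then " Drop the base !!!Break the base!!! " else " Drop the base ")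
       else " Drop the base ") := by
  rw [alt_eq, alt_eq, List.foldl_append]
  simp only [List.foldl_cons, List.foldl_nil]
  have hfst : (xs.foldl bStep ((0 : Int), ([] : List String))).1 = trail xs := by
    rw [bfold_fst]; rfl
  generalize hG : xs.foldl bStep ((0 : Int), ([] : List String)) = st at hfst ⊢
  obtain ⟨c, parts⟩ := st
  simp only at hfst
  subst hfst
  unfold bStep
  by_cases h0 : x = 0 <;> by_cases h1 : x = 1 <;>
    simp [h0, h1, join_snoc]

theorem main_eq (l : List Int) : lyrics_generator l = lyrics_generator_alt l := by
  induction l using List.reverseRecOn with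
  | nil => rfl
  | append_singleton xs x ih =>
    rw [A_snoc, B_snoc, ih]
    congr 1
    by_cases hx0 : x = 0
    · simp [hx0]
    · rw [if_neg hx0, if_neg hx0]
      by_cases hx1 : x = 1
      · rw [if_pos hx1]
        have htwo := trail_ge_two xs
        by_cases hge : trail xs + 1 ≥ 3
        · rw [if_pos hge, if_pos]
          obtain ⟨a, b, c⟩ := htwo.mp (by omega)
          exact ⟨a, hx1, b, c⟩
        · rw [if_neg hge, if_neg]
          rintro ⟨a, -, b, c⟩
          have := htwo.mpr ⟨a, b, c⟩
          omega
      · rw [if_neg hx1, if_neg]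
        rintro ⟨-, h, -⟩
        exact hx1 h

-- ===== VERDICT (by name: the statement is the Claim_ definition above) =====
theorem lyrics_generator_spec : Claim_equal_lyrics_generator := by
  intro l _
  exact main_eq l
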